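-- pv_equiv track=rewrite | github.com/promptshane/signal-watch | signal_watch/signals.py | signal_age
-- ===== SOURCE A (Python) =====
-- from enum import Enum
-- from typing import List, Tuple
--
-- class State(str, Enum):
--     """Discrete signal state for an indicator."""
--
--     BUY = "buy"
--     SELL = "sell"
--     HOLD = "hold"
--
-- def signal_age(series_states: List[State], idx: int) -> int:
--     """Compute how many bars ago the given state last changed.
--
--     Args:
--         series_states: List of states for each bar.
--         idx: Index of the current bar.
--
--     Returns:
--         The number of bars since the last state change.
--     """
--     if idx < 0:
--         return 0
--     current = series_states[idx]
--     age = 0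
--     for j in range(idx - 1, -1, -1):
--         if series_states[j] != current:
--             break
--         age += 1
--     return age
-- ===== SOURCE B (Python) =====
-- def signal_age(series_states, idx):
--     if idx < 0:
--         return 0
--     last_change = 0
--     for j in range(1, idx + 1):
--         if series_states[j] != series_states[j - 1]:
--             last_change = j
--     return idx - last_change
-- ===== Notes on version B (the rewrite author's own statement) =====
-- stated objective: alternative
-- what changed: B scans the prefix forward once, maintaining the index of the last state change, and returns idx - last_change, instead of A's backward count of equal states with an early break.
import Mathlib
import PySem

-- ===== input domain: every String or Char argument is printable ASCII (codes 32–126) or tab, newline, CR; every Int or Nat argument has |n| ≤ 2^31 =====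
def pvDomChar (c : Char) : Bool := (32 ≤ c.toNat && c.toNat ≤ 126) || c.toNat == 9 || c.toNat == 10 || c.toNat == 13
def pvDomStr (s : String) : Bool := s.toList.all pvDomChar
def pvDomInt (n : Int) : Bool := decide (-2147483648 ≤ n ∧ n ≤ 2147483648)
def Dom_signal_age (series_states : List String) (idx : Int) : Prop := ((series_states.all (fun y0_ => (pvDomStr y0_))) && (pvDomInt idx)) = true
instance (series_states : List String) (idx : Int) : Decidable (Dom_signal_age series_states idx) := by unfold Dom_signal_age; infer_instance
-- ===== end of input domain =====

-- B replaces A's backward count-until-mismatch with a forward scan that maintains the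
-- index of the last state change and returns idx - last_change (alternative decomposition,
-- same linear cost; return-value equivalence only, neither version mutates its argument).

-- ===== PORT A =====
-- loop body of A's backward 'for j in range(idx-1,-1,-1)' with its break flag;
-- s[j] ported as pyGetD (exact: under Pre_ every visited j is in range 0 ≤ j < len)
def aStep (s : List String) (current : String) (st : Int × Bool) (j : Int) : Int × Bool :=
  if st.2 then st
  else if PySem.List.pyGetD s j "" ≠ current then (st.1, true)
  else (st.1 + 1, st.2)

def signal_age (series_states : List String) (idx : Int) : Int :=
  if idx < 0 then 0
  else
    match PySem.List.pyGet? series_states idx with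
    | none => 0   -- IndexError in Python; excluded by Pre_signal_age
    | some current =>
        ((PySem.List.pyRange (idx - 1) (-1) (-1)).foldl (aStep series_states current) (0, false)).1

-- ===== PORT B =====
-- loop body of B's forward 'for j in range(1, idx+1)'; same pyGetD remark as above
def bStep (s : List String) (lc j : Int) : Int :=
  if PySem.List.pyGetD s j "" ≠ PySem.List.pyGetD s (j - 1) "" then j else lc

def signal_age_alt (series_states : List String) (idx : Int) : Int :=
  if idx < 0 then 0
  else
    idx - (PySem.List.pyRange 1 (idx + 1) 1).foldl (bStep series_states) 0

-- ===== PRECONDITION & SPEC =====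
-- Pre_ excludes exactly the inputs where A raises IndexError: idx ≥ len(series_states)
def Pre_signal_age (series_states : List String) (idx : Int) : Prop :=
  idx < (series_states.length : Int)
instance (series_states : List String) (idx : Int) : Decidable (Pre_signal_age series_states idx) := by unfold Pre_signal_age; infer_instance

def pvWitness_signal_age : List String × Int := (["buy", "buy", "sell"], 2)

def Spec_signal_age (series_states : List String) (idx : Int) (out : Int) : Prop := out = signal_age_alt series_states idx
instance (series_states : List String) (idx : Int) (out : Int) : Decidable (Spec_signal_age series_states idx out) := by unfold Spec_signal_age; infer_instance

-- ===== CLAIM (what is proved, stated in full; the proofs are below) =====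
def Claim_equal_signal_age : Prop := ∀ (series_states : List String) (idx : Int), Dom_signal_age series_states idx → Pre_signal_age series_states idx → Spec_signal_age series_states idx (signal_age series_states idx)

-- ===== LEMMAS AND PROOFS =====

-- once the break flag is set, A's fold is constant
theorem aFold_broken (s : List String) (current : String) (l : List Int) (a : Int) :
    l.foldl (aStep s current) (a, true) = (a, true) := by
  induction l with
  | nil => rfl
  | cons j l ih => simpa [aStep] using ih

-- the accumulated age shifts linearly while the flag is clear
theorem aFold_shift (s : List String) (current : String) (l : List Int) (a : Int) :
    l.foldl (aStep s current) (a, false)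
      = ((l.foldl (aStep s current) (0, false)).1 + a,
         (l.foldl (aStep s current) (0, false)).2) := by
  induction l generalizing a with
  | nil => simp
  | cons j l ih =>
    by_cases h : PySem.List.pyGetD s j "" = current
    · have hs : ∀ b : Int, aStep s current (b, false) j = (b + 1, false) := by
        intro b; simp [aStep, h]
      simp only [List.foldl_cons, hs]
      rw [ih (a + 1), ih (0 + 1)]
      refine Prod.ext (by simp; ring) (by simp)
    · simp [List.foldl_cons, aStep, h, aFold_broken]

-- A's loop result as a function of the (nonnegative) bar index
def aRun (s : List String) (current : String) (n : Nat) : Int :=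
  ((PySem.List.pyRange ((n : Int) - 1) (-1) (-1)).foldl (aStep s current) (0, false)).1

theorem aRun_zero (s : List String) (current : String) : aRun s current 0 = 0 := by
  simp [aRun]

theorem aRun_succ (s : List String) (current : String) (n : Nat) :
    aRun s current (n + 1)
      = if s.getD n "" ≠ current then 0 else 1 + aRun s current n := by
  have hcons : PySem.List.pyRange ((n : Int) + 1 - 1) (-1) (-1)
      = (n : Int) :: PySem.List.pyRange ((n : Int) - 1) (-1) (-1) := by
    have := PySem.List.pyRange_neg_one_cons (a := (n : Int)) (b := -1) (by omega)
    simpa using this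
  unfold aRun
  rw [show ((n + 1 : Nat) : Int) - 1 = (n : Int) + 1 - 1 by push_cast; ring, hcons]
  have hpg : PySem.List.pyGetD s (n : Int) "" = s.getD n "" :=
    PySem.List.pyGetD_natCast s n ""
  by_cases h : s.getD n "" = current
  all_goals rw [List.getD_eq_getElem?_getD] at h
  · have hs : aStep s current (0, false) (n : Int) = (1, false) := by
      simp [aStep, hpg, h]
    rw [List.foldl_cons, hs, aFold_shift, if_neg (by simp [h])]
    simp; ring
  · have hs : aStep s current (0, false) (n : Int) = (0, true) := by
      simp [aStep, hpg, h]
    rw [List.foldl_cons, hs, aFold_broken, if_pos (by simp [h])]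

-- B's last_change accumulator as a function of the bar index
def bLC (s : List String) (n : Nat) : Int :=
  (PySem.List.pyRange 1 ((n : Int) + 1) 1).foldl (bStep s) 0

theorem bLC_zero (s : List String) : bLC s 0 = 0 := by
  simp [bLC]

theorem bLC_succ (s : List String) (n : Nat) :
    bLC s (n + 1)
      = if s.getD (n + 1) "" ≠ s.getD n "" then ((n : Int) + 1) else bLC s n := by
  have hsplit : PySem.List.pyRange 1 (((n + 1 : Nat) : Int) + 1) 1
      = PySem.List.pyRange 1 ((n : Int) + 1) 1 ++ [(n : Int) + 1] := by
    have := PySem.List.pyRange_one_succ_right (a := 1) (b := (n : Int) + 1) (by omega)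
    simpa using this
  unfold bLC
  rw [hsplit, List.foldl_append]
  simp only [List.foldl_cons, List.foldl_nil, bStep]
  have h1 : PySem.List.pyGetD s ((n : Int) + 1) "" = s.getD (n + 1) "" := by
    rw [show ((n : Int) + 1) = ((n + 1 : Nat) : Int) by push_cast; ring,
      PySem.List.pyGetD_natCast]
  have h2 : PySem.List.pyGetD s ((n : Int) + 1 - 1) "" = s.getD n "" := by
    rw [show ((n : Int) + 1 - 1) = ((n : Nat) : Int) by ring,
      PySem.List.pyGetD_natCast]
  rw [h1, h2]

-- main invariant: A's backward count equals n minus B's last-change index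
theorem run_eq (s : List String) (n : Nat) (hn : n < s.length) :
    aRun s (s.getD n "") n = (n : Int) - bLC s n := by
  induction n with
  | zero => simp [aRun_zero, bLC_zero]
  | succ n ih =>
    have hn' : n < s.length := by omega
    rw [aRun_succ, bLC_succ]
    by_cases h : s.getD (n + 1) "" = s.getD n ""
    · have h' := h
      rw [List.getD_eq_getElem?_getD, List.getD_eq_getElem?_getD] at h'
      rw [if_neg (by simp [h']), if_neg (by simp [h']), h, ih hn']
      push_cast; ring
    · rw [if_pos (fun hh => h hh.symm), if_pos h]
      push_cast; ring

-- ===== VERDICT (by name: the statement is the Claim_ definition above) =====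
theorem signal_age_spec : Claim_equal_signal_age := by
  intro s idx _hdom hpre
  unfold Spec_signal_age signal_age signal_age_alt
  by_cases hneg : idx < 0
  · simp [hneg]
  · have h0 : 0 ≤ idx := by omega
    obtain ⟨n, rfl⟩ : ∃ n : Nat, idx = (n : Int) := ⟨idx.toNat, (Int.toNat_of_nonneg h0).symm⟩
    have hnlen : n < s.length := by
      have hp := hpre; unfold Pre_signal_age at hp; exact_mod_cast hp
    rw [if_neg hneg, if_neg hneg]
    have hpg : PySem.List.pyGet? s (n : Int) = some (s.getD n "") := by
      simp [List.getElem?_eq_getElem hnlen, List.getD_eq_getElem?_getD]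
    rw [hpg]
    have hr := run_eq s n hnlen
    unfold aRun bLC at hr
    exact hr
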